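-- pv_equiv track=rewrite | github.com/Gerrytty/algorithms-and-data-structures | yandex/3.0/B/task22.py | get_num_vars
-- ===== SOURCE A (Python) =====
-- def get_num_vars(n, k):
--     arr = []
--
--     for i in range(n):
--         if i < k:
--             if i == 0:
--                 arr.append(1)
--             else:
--                 arr.append(sum(arr) + 1)
--         else:
--             ans = 0
--             for j in range(k):
--                 ans += arr[i - j - 1]
--             arr.append(ans)
--     return arr
-- ===== SOURCE B (Python) =====
-- def get_num_vars(n, k):
--     arr = []
--     s = 0  # sum of the last min(len(arr), k) elements (sliding window)
--     for i in range(n):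
--         v = s if i >= k else s + 1
--         arr.append(v)
--         s += v
--         if k >= 1 and i >= k:
--             s -= arr[i - k]
--     return arr
-- ===== Notes on version B (the rewrite author's own statement) =====
-- stated objective: faster
-- what changed: replaces the per-step rescan (sum(arr) / inner loop over the last k entries) by a single sliding-window sum updated in O(1) per step
import Mathlib
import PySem

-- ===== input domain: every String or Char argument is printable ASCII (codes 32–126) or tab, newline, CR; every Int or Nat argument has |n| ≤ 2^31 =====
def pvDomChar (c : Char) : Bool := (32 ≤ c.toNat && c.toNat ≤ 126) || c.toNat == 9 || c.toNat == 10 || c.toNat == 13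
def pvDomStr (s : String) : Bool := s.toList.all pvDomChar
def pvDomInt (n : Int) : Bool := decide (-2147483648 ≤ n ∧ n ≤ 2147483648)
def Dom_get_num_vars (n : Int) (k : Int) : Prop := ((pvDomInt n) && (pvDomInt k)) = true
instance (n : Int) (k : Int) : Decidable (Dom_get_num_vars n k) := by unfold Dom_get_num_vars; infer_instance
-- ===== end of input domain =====

-- B replaces A's per-step rescan of the last k entries by one sliding-window sum updated per step.

-- ===== PORT A =====
def get_num_vars (n : Int) (k : Int) : List Int :=
  (PySem.List.pyRange 0 n 1).foldl (fun arr i =>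
    if i < k then
      if i = 0 then arr ++ [1]
      else arr ++ [arr.sum + 1]
    else
      let ans := (PySem.List.pyRange 0 k 1).foldl
        (fun ans j => ans + PySem.List.pyGetD arr (i - j - 1) 0) 0
      arr ++ [ans]) []

-- ===== PORT B =====
def get_num_vars_alt (n : Int) (k : Int) : List Int :=
  ((PySem.List.pyRange 0 n 1).foldl (fun (p : List Int × Int) i =>
    let v := if i ≥ k then p.2 else p.2 + 1
    let arr := p.1 ++ [v]
    let s := p.2 + v
    let s := if 1 ≤ k ∧ k ≤ i then s - PySem.List.pyGetD arr (i - k) 0 else s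
    (arr, s)) ([], 0)).1

-- ===== PRECONDITION & SPEC =====
def Spec_get_num_vars (n : Int) (k : Int) (out : List Int) : Prop := out = get_num_vars_alt n k
instance (n : Int) (k : Int) (out : List Int) : Decidable (Spec_get_num_vars n k out) := by unfold Spec_get_num_vars; infer_instance

-- ===== CLAIM (what is proved, stated in full; the proofs are below) =====
def Claim_equal_get_num_vars : Prop := ∀ (n : Int) (k : Int), Dom_get_num_vars n k → Spec_get_num_vars n k (get_num_vars n k)

-- ===== LEMMAS AND PROOFS =====

lemma pvFoldAdd (g : Nat → Int) (l : List Nat) (a : Int) :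
    l.foldl (fun acc x => acc + g x) a = a + (l.map g).sum := by
  induction l generalizing a with
  | nil => simp
  | cons x l ih => simp [List.foldl_cons, ih]; ring

lemma pvInnerNat (arr : List Int) (m K : Nat) (hm : arr.length = m) (hK : K ≤ m) :
    ((List.range K).map (fun j => arr.getD (m - 1 - j) 0)).sum = (arr.drop (m - K)).sum := by
  induction K with
  | zero => simp [hm ▸ List.drop_length (l := arr)]
  | succ K ih =>
    rw [List.range_succ, List.map_append, List.sum_append]
    have hK' : K ≤ m := by omega
    rw [ih hK']
    have h1 : m - K - 1 < arr.length := by omega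
    have hdrop : arr.drop (m - (K + 1)) = arr[m - K - 1] :: arr.drop (m - K) := by
      have := List.drop_eq_getElem_cons (l := arr) (i := m - K - 1) h1
      have e1 : m - (K + 1) = m - K - 1 := by omega
      have e2 : m - K - 1 + 1 = m - K := by omega
      rw [e1, this, e2]
    rw [hdrop, List.sum_cons]
    have hg : arr.getD (m - 1 - K) 0 = arr[m - K - 1] := by
      have e : m - 1 - K = m - K - 1 := by omega
      rw [e, List.getD_eq_getElem arr 0 h1]
    rw [show (List.map (fun j => arr.getD (m - 1 - j) 0) [K]).sum = arr.getD (m - 1 - K) 0 by simp, hg]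
    ring

lemma pvInner (k : Int) (arr : List Int) (m : Nat) (hm : arr.length = m)
    (hk1 : 1 ≤ k) (hkm : k ≤ (m : Int)) :
    (PySem.List.pyRange 0 k 1).foldl
      (fun ans j => ans + PySem.List.pyGetD arr ((m : Int) - j - 1) 0) 0
    = (arr.drop (m - k.toNat)).sum := by
  rw [PySem.List.pyRange_one, List.foldl_map,
      pvFoldAdd (fun jn : Nat => PySem.List.pyGetD arr ((m : Int) - (0 + (jn : Int)) - 1) 0)]
  have hKm : (k - 0).toNat ≤ m := by omega
  have hmap : (List.range (k - 0).toNat).map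
      (fun jn : Nat => PySem.List.pyGetD arr ((m : Int) - (0 + (jn : Int)) - 1) 0)
      = (List.range (k - 0).toNat).map (fun j => arr.getD (m - 1 - j) 0) := by
    apply List.map_congr_left
    intro jn hjn
    have hjn' : jn < (k - 0).toNat := List.mem_range.mp hjn
    have e : (m : Int) - (0 + (jn : Int)) - 1 = ((m - 1 - jn : Nat) : Int) := by omega
    rw [e, PySem.List.pyGetD_natCast]
  rw [hmap, pvInnerNat arr m _ hm hKm]
  have e2 : (k - 0).toNat = k.toNat := by omega
  rw [e2]; omega

def pvStepA (k : Int) (arr : List Int) (i : Int) : List Int :=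
  if i < k then
    if i = 0 then arr ++ [1]
    else arr ++ [arr.sum + 1]
  else
    let ans := (PySem.List.pyRange 0 k 1).foldl
      (fun ans j => ans + PySem.List.pyGetD arr (i - j - 1) 0) 0
    arr ++ [ans]

def pvStepB (k : Int) (p : List Int × Int) (i : Int) : List Int × Int :=
  let v := if i ≥ k then p.2 else p.2 + 1
  let arr := p.1 ++ [v]
  let s := p.2 + v
  let s := if 1 ≤ k ∧ k ≤ i then s - PySem.List.pyGetD arr (i - k) 0 else s
  (arr, s)

def pvWin (k : Int) (arr : List Int) : Int := (arr.drop (arr.length - k.toNat)).sum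

lemma pvStep (k : Int) (arr : List Int) (m : Nat) (hm : arr.length = m) :
    pvStepB k (arr, pvWin k arr) (m : Int)
      = (pvStepA k arr (m : Int), pvWin k (pvStepA k arr (m : Int))) := by
  by_cases hik : (m : Int) < k
  · -- first phase: i < k
    have hA : pvStepA k arr (m : Int) = arr ++ [arr.sum + 1] := by
      unfold pvStepA
      rw [if_pos hik]
      by_cases h0 : (m : Int) = 0
      · have hm0 : arr.length = 0 := by omega
        have harr : arr = [] := List.eq_nil_of_length_eq_zero hm0
        subst harr; simp [h0]
      · rw [if_neg h0]
    have hw : pvWin k arr = arr.sum := by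
      unfold pvWin
      have h0 : arr.length - k.toNat = 0 := by omega
      rw [h0, List.drop_zero]
    have hwin : pvWin k (arr ++ [arr.sum + 1]) = arr.sum + (arr.sum + 1) := by
      unfold pvWin
      have h0 : (arr ++ [arr.sum + 1]).length - k.toNat = 0 := by
        simp only [List.length_append, List.length_cons, List.length_nil]; omega
      rw [h0, List.drop_zero, List.sum_append, List.sum_cons, List.sum_nil, add_zero]
    rw [hA]
    simp only [pvStepB, ge_iff_le, hw, hwin]
    rw [if_neg (by omega : ¬ k ≤ (m : Int)), if_neg (by omega : ¬ (1 ≤ k ∧ k ≤ (m : Int)))]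
  · by_cases hk1 : 1 ≤ k
    · -- window phase: 1 ≤ k ≤ m
      have hkm : k ≤ (m : Int) := by omega
      have hKm : k.toNat ≤ m := by omega
      have hK1 : 1 ≤ k.toNat := by omega
      have hA : pvStepA k arr (m : Int) = arr ++ [pvWin k arr] := by
        unfold pvStepA
        rw [if_neg hik]
        simp only
        rw [pvInner k arr m hm hk1 hkm]
        unfold pvWin; rw [hm]
      have hidx : m - k.toNat < arr.length := by omega
      have hget : PySem.List.pyGetD (arr ++ [pvWin k arr]) ((m : Int) - k) 0
          = arr[m - k.toNat] := by
        have e : (m : Int) - k = ((m - k.toNat : Nat) : Int) := by omega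
        rw [e, PySem.List.pyGetD_natCast]
        rw [List.getD_eq_getElem _ 0 (by simp; omega)]
        exact List.getElem_append_left _
      have hwW : pvWin k arr = arr[m - k.toNat] + (arr.drop (m + 1 - k.toNat)).sum := by
        unfold pvWin
        rw [hm]
        rw [List.drop_eq_getElem_cons (l := arr) (i := m - k.toNat) hidx, List.sum_cons]
        have e : m - k.toNat + 1 = m + 1 - k.toNat := by omega
        rw [e]
      have hwin : pvWin k (arr ++ [pvWin k arr])
          = pvWin k arr + pvWin k arr - arr[m - k.toNat] := by
        set w := pvWin k arr with hw
        unfold pvWin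
        have hl : (arr ++ [w]).length - k.toNat = m + 1 - k.toNat := by
          simp only [List.length_append, List.length_cons, List.length_nil]; omega
        rw [hl, List.drop_append_of_le_length (by omega), List.sum_append, List.sum_cons,
            List.sum_nil, add_zero]
        linarith [hwW]
      rw [hA]
      simp only [pvStepB, ge_iff_le]
      rw [if_pos (by omega : k ≤ (m : Int)), if_pos ⟨hk1, hkm⟩, hget, hwin]
    · -- k ≤ 0: every entry is 0
      have hk0 : k ≤ 0 := by omega
      have hKt : k.toNat = 0 := by omega
      have hw : pvWin k arr = 0 := by
        unfold pvWin
        rw [hKt, Nat.sub_zero, List.drop_length, List.sum_nil]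
      have hA : pvStepA k arr (m : Int) = arr ++ [0] := by
        unfold pvStepA
        rw [if_neg hik]
        simp only
        rw [PySem.List.pyRange_one_eq_nil (by omega), List.foldl_nil]
      have hwin : pvWin k (arr ++ [0]) = 0 := by
        unfold pvWin
        rw [hKt, Nat.sub_zero, List.drop_length, List.sum_nil]
      rw [hA]
      simp only [pvStepB, ge_iff_le, hw, hwin]
      rw [if_pos (by omega : k ≤ (m : Int)), if_neg (by omega : ¬ (1 ≤ k ∧ k ≤ (m : Int)))]
      simp

lemma pvLenA (k : Int) (arr : List Int) (i : Int) :
    (pvStepA k arr i).length = arr.length + 1 := by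
  unfold pvStepA; split_ifs <;> simp

lemma pvMain (k : Int) (m : Nat) :
    ((PySem.List.pyRange 0 (m : Int) 1).foldl (pvStepB k) ([], 0)
      = ((PySem.List.pyRange 0 (m : Int) 1).foldl (pvStepA k) [],
         pvWin k ((PySem.List.pyRange 0 (m : Int) 1).foldl (pvStepA k) [])))
    ∧ ((PySem.List.pyRange 0 (m : Int) 1).foldl (pvStepA k) []).length = m := by
  induction m with
  | zero =>
    rw [PySem.List.pyRange_one_eq_nil (by omega)]
    simp [pvWin]
  | succ m ih =>
    have hcast : ((m + 1 : Nat) : Int) = (m : Int) + 1 := by push_cast; ring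
    rw [hcast, PySem.List.pyRange_one_succ_right (by omega)]
    rw [List.foldl_append, List.foldl_append, List.foldl_cons, List.foldl_nil,
        List.foldl_cons, List.foldl_nil, ih.1]
    refine ⟨?_, ?_⟩
    · exact pvStep k _ m ih.2
    · rw [pvLenA, ih.2]

lemma pvGetA (n k : Int) :
    get_num_vars n k = (PySem.List.pyRange 0 n 1).foldl (pvStepA k) [] := rfl

lemma pvGetB (n k : Int) :
    get_num_vars_alt n k = ((PySem.List.pyRange 0 n 1).foldl (pvStepB k) ([], 0)).1 := rfl

-- ===== VERDICT (by name: the statement is the Claim_ definition above) =====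
theorem get_num_vars_spec : Claim_equal_get_num_vars := by
  intro n k _
  unfold Spec_get_num_vars
  rw [pvGetA, pvGetB]
  by_cases hn : n ≤ 0
  · rw [PySem.List.pyRange_one_eq_nil hn]; rfl
  · obtain ⟨m, rfl⟩ : ∃ m : Nat, n = (m : Int) := ⟨n.toNat, (Int.toNat_of_nonneg (by omega)).symm⟩
    rw [(pvMain k m).1]
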